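-- pv_equiv track=rewrite | github.com/cirosantilli/project-euler-solvers | solvers/432.py | subset_products_with_sign
-- ===== SOURCE A (Python) =====
-- def subset_products_with_sign(prime_factors: list[int]) -> list[tuple[int, int]]:
--     """All non-empty subset products, with sign = +1 (odd size) or -1 (even size)."""
--     pf = prime_factors
--     k = len(pf)
--     out: list[tuple[int, int]] = []
--     for mask in range(1, 1 << k):
--         prod = 1
--         bits = 0
--         mm = mask
--         idx = 0
--         while mm:
--             if mm & 1:
--                 prod *= pf[idx]
--                 bits += 1
--             idx += 1
--             mm >>= 1
--         sign = 1 if (bits & 1) else -1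
--         out.append((prod, sign))
--     out.sort(key=lambda t: t[0])
--     return out
-- ===== SOURCE B (Python) =====
-- def subset_products_with_sign(prime_factors: list[int]) -> list[tuple[int, int]]:
--     """All non-empty subset products, with sign = +1 (odd size) or -1 (even size)."""
--     rows = [(1, -1)]  # empty subset: product 1, even size
--     for x in prime_factors:
--         rows += [(p * x, -s) for (p, s) in rows]
--     out = rows[1:]
--     out.sort(key=lambda t: t[0])
--     return out
-- ===== Notes on version B (the rewrite author's own statement) =====
-- stated objective: alternative
-- what changed: Replaces the per-mask bit-extraction while-loop (recomputing each subset product from scratch) with a list-doubling pass: starting from the empty-subset row, each factor appends a sign-flipped multiplied copy of all rows built so far, preserving mask-ascending order before the identical stable sort.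
import Mathlib
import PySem

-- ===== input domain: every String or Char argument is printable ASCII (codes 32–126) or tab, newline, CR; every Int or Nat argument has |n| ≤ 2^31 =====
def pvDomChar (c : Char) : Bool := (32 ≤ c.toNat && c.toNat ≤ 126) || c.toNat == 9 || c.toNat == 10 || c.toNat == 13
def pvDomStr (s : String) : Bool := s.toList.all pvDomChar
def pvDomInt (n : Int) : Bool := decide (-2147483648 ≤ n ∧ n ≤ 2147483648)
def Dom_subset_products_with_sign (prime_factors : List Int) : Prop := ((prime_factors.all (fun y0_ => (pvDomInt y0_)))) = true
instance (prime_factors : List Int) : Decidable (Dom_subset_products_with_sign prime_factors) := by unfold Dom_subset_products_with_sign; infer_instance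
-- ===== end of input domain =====

-- B replaces A's per-mask bit-extraction loop with a list-doubling pass (same mask-ascending
-- order, same stable sort): a different enumeration of the same rows.
-- ===== PORT A =====
-- the `while mm:` loop of A; pf[idx] is only read when a bit of the original mask is set,
-- and mask < 2^len(pf) keeps those reads in range, so the .getD default 1 is never used
def pvLoopA (pf : List Int) (mm idx : Nat) (prod : Int) (bits : Nat) : Int × Nat :=
  if h : mm = 0 then (prod, bits)
  else if mm % 2 = 1 then
    pvLoopA pf (mm / 2) (idx + 1) (prod * ((PySem.List.pyGet? pf (idx : Int)).getD 1)) (bits + 1)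
  else
    pvLoopA pf (mm / 2) (idx + 1) prod bits
termination_by mm
decreasing_by all_goals exact Nat.div_lt_self (Nat.pos_of_ne_zero h) one_lt_two

def subset_products_with_sign (prime_factors : List Int) : List (Int × Int) :=
  let pf := prime_factors
  let k := pf.length
  -- range(1, 1 << k): masks are the naturals 1 .. 2^k - 1 in ascending order
  let out := ((List.range (2 ^ k)).drop 1).map (fun mask =>
    ((pvLoopA pf mask 0 1 0).1,
     if (pvLoopA pf mask 0 1 0).2 % 2 = 1 then (1 : Int) else (-1 : Int)))
  PySem.List.sorted out (fun t => t.1)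

-- ===== PORT B =====
def subset_products_with_sign_alt (prime_factors : List Int) : List (Int × Int) :=
  let rows := prime_factors.foldl
    (fun acc x => acc ++ acc.map (fun r => (r.1 * x, -r.2)))
    [((1 : Int), (-1 : Int))]
  PySem.List.sorted (rows.drop 1) (fun t => t.1)

-- ===== PRECONDITION & SPEC =====
def Spec_subset_products_with_sign (prime_factors : List Int) (out : List (Int × Int)) : Prop := out = subset_products_with_sign_alt prime_factors
instance (prime_factors : List Int) (out : List (Int × Int)) : Decidable (Spec_subset_products_with_sign prime_factors out) := by unfold Spec_subset_products_with_sign; infer_instance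

-- ===== CLAIM (what is proved, stated in full; the proofs are below) =====
def Claim_equal_subset_products_with_sign : Prop := ∀ (prime_factors : List Int), Dom_subset_products_with_sign prime_factors → Spec_subset_products_with_sign prime_factors (subset_products_with_sign prime_factors)

-- ===== LEMMAS AND PROOFS =====

lemma pvLoopA_zero (pf : List Int) (idx : Nat) (prod : Int) (bits : Nat) :
    pvLoopA pf 0 idx prod bits = (prod, bits) := by
  rw [pvLoopA]; simp

lemma pvLoopA_step (pf : List Int) (mm idx : Nat) (prod : Int) (bits : Nat) (h : mm ≠ 0) :
    pvLoopA pf mm idx prod bits =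
      if mm % 2 = 1 then
        pvLoopA pf (mm / 2) (idx + 1) (prod * ((PySem.List.pyGet? pf (idx : Int)).getD 1)) (bits + 1)
      else
        pvLoopA pf (mm / 2) (idx + 1) prod bits := by
  conv_lhs => rw [pvLoopA]
  simp [h]

-- reads of pvLoopA stay in the prefix: appending xs after ys does not change the result
lemma pvLoopA_append (ys xs : List Int) (mm idx : Nat) (prod : Int) (bits : Nat)
    (hmm : mm < 2 ^ (ys.length - idx)) :
    pvLoopA (ys ++ xs) mm idx prod bits = pvLoopA ys mm idx prod bits := by
  induction mm using Nat.strong_induction_on generalizing idx prod bits with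
  | _ mm ih =>
    by_cases h0 : mm = 0
    · subst h0; rw [pvLoopA_zero, pvLoopA_zero]
    · have hd : ys.length - idx ≠ 0 := by
        intro h; rw [h] at hmm; simp at hmm; omega
      have hidx : idx < ys.length := by omega
      obtain ⟨e, he⟩ : ∃ e, ys.length - idx = e + 1 := ⟨ys.length - idx - 1, by omega⟩
      have hpow : 2 ^ (e + 1) = 2 * 2 ^ e := by ring
      have hmm' : mm / 2 < 2 ^ (ys.length - (idx + 1)) := by
        have h1 : ys.length - (idx + 1) = e := by omega
        rw [h1]; rw [he, hpow] at hmm; omega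
      have hget : PySem.List.pyGet? (ys ++ xs) (idx : Int) = PySem.List.pyGet? ys (idx : Int) := by
        rw [PySem.List.pyGet?_natCast, PySem.List.pyGet?_natCast,
            List.getElem?_append_left hidx]
      rw [pvLoopA_step (ys ++ xs) mm idx prod bits h0, pvLoopA_step ys mm idx prod bits h0, hget]
      have hlt := Nat.div_lt_self (Nat.pos_of_ne_zero h0) one_lt_two
      by_cases hp : mm % 2 = 1
      · rw [if_pos hp, if_pos hp]; exact ih _ hlt _ _ _ hmm'
      · rw [if_neg hp, if_neg hp]; exact ih _ hlt _ _ _ hmm'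

-- adding the high bit 2^n multiplies the product by pf[idx+n] and bumps the bit count
lemma pvLoopA_highbit (pf : List Int) (n mm idx : Nat) (prod : Int) (bits : Nat)
    (hmm : mm < 2 ^ n) :
    pvLoopA pf (mm + 2 ^ n) idx prod bits =
      ((pvLoopA pf mm idx prod bits).1 * ((PySem.List.pyGet? pf ((idx + n : Nat) : Int)).getD 1),
       (pvLoopA pf mm idx prod bits).2 + 1) := by
  induction n generalizing mm idx prod bits with
  | zero =>
    interval_cases mm
    rw [pvLoopA_zero, zero_add, pow_zero, pvLoopA_step pf 1 idx prod bits one_ne_zero]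
    norm_num [pvLoopA_zero]
  | succ n ihn =>
    have hpow : 2 ^ (n + 1) = 2 * 2 ^ n := by ring
    have hidx : idx + 1 + n = idx + (n + 1) := by omega
    by_cases h0 : mm = 0
    · subst h0
      rw [pvLoopA_zero, zero_add,
          pvLoopA_step pf (2 ^ (n + 1)) idx prod bits (by positivity),
          if_neg (by rw [hpow]; omega),
          show 2 ^ (n + 1) / 2 = 0 + 2 ^ n from by rw [hpow]; omega,
          ihn 0 (idx + 1) prod bits (by positivity), pvLoopA_zero, hidx]
    · have hne : mm + 2 ^ (n + 1) ≠ 0 := by positivity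
      have hmod : (mm + 2 ^ (n + 1)) % 2 = mm % 2 := by rw [hpow]; omega
      have hdiv : (mm + 2 ^ (n + 1)) / 2 = mm / 2 + 2 ^ n := by rw [hpow]; omega
      have hmm2 : mm / 2 < 2 ^ n := by rw [hpow] at hmm; omega
      rw [pvLoopA_step pf (mm + 2 ^ (n + 1)) idx prod bits hne, hmod, hdiv,
          pvLoopA_step pf mm idx prod bits h0]
      by_cases hp : mm % 2 = 1
      · rw [if_pos hp, if_pos hp, ihn (mm / 2) (idx + 1) _ _ hmm2, hidx]
      · rw [if_neg hp, if_neg hp, ihn (mm / 2) (idx + 1) prod bits hmm2, hidx]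

-- the unsorted lists agree: A's mask enumeration (including mask 0) equals B's doubling fold
lemma pvMain (pf : List Int) :
    (List.range (2 ^ pf.length)).map (fun mask =>
      ((pvLoopA pf mask 0 1 0).1,
       if (pvLoopA pf mask 0 1 0).2 % 2 = 1 then (1 : Int) else (-1 : Int)))
    = pf.foldl (fun acc x => acc ++ acc.map (fun r => (r.1 * x, -r.2)))
        [((1 : Int), (-1 : Int))] := by
  induction pf using List.reverseRecOn with
  | nil => simp [pvLoopA_zero]
  | append_singleton ys x ih =>
    have hlen : (ys ++ [x]).length = ys.length + 1 := by simp
    rw [List.foldl_append, ← ih, List.foldl_cons, List.foldl_nil,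
        hlen, pow_succ, mul_two, List.range_add, List.map_append, List.map_map, List.map_map]
    congr 1
    · apply List.map_congr_left
      intro m hm
      have hm' : m < 2 ^ ys.length := List.mem_range.mp hm
      rw [pvLoopA_append ys [x] m 0 1 0 (by simpa using hm')]
    · apply List.map_congr_left
      intro m hm
      have hm' : m < 2 ^ ys.length := List.mem_range.mp hm
      have hget : PySem.List.pyGet? (ys ++ [x]) ((0 + ys.length : Nat) : Int) = some x := by
        rw [PySem.List.pyGet?_natCast]; simp
      simp only [Function.comp_apply]
      rw [Nat.add_comm (2 ^ ys.length) m,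
          pvLoopA_highbit (ys ++ [x]) ys.length m 0 1 0 hm', hget,
          pvLoopA_append ys [x] m 0 1 0 (by simpa using hm')]
      simp only [Option.getD_some, Prod.mk.injEq, true_and]
      by_cases hb : (pvLoopA ys m 0 1 0).2 % 2 = 1
      · rw [if_pos hb, if_neg (by omega)]
      · rw [if_neg hb, if_pos (by omega)]; norm_num

-- ===== VERDICT (by name: the statement is the Claim_ definition above) =====
theorem subset_products_with_sign_spec : Claim_equal_subset_products_with_sign := by
  intro pf _
  unfold Spec_subset_products_with_sign subset_products_with_sign subset_products_with_sign_alt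
  simp only []
  rw [List.map_drop, pvMain]
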